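-- pv_equiv track=rewrite | github.com/vkorkiak/cluster_codes | scripting_help.py | add2base
-- ===== SOURCE A (Python) =====
-- def add2base(allbases, curval, params2modify):
--     if len(params2modify)==0:
--         allbases.append(curval)
--         return
--     param, vals = params2modify[0][0], params2modify[0][1]
--     for val in vals:
--         add2base(allbases, curval+'_'+param+str(val), params2modify[1:])
--     return allbases
-- ===== SOURCE B (Python) =====
-- def add2base(allbases, curval, params2modify):
--     if len(params2modify) == 0:
--         allbases.append(curval)
--         return None
--     combos = [curval]
--     for name, vals in params2modify:
--         combos = [c + '_' + name + str(v) for c in combos for v in vals]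
--     allbases.extend(combos)
--     return allbases
-- ===== Notes on version B (the rewrite author's own statement) =====
-- stated objective: simpler
-- what changed: Replaced depth-first recursion (with list slicing params2modify[1:] at every level) by a single iterative left-to-right pass that builds the combination strings breadth-first with a list comprehension, then extends allbases once.
import Mathlib
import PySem

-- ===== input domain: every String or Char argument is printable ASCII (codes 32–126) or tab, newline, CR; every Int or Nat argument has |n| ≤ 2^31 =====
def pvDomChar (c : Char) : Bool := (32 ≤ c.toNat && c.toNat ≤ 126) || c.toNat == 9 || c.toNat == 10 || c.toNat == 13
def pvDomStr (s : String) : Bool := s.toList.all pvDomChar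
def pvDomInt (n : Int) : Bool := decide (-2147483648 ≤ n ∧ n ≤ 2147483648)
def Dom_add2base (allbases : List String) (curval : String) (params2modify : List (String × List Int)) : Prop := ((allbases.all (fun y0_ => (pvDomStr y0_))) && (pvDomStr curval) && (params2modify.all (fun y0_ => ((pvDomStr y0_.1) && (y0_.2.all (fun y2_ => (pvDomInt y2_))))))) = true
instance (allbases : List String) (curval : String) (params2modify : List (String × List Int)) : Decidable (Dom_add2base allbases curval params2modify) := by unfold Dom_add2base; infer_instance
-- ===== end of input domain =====

-- B replaces A's depth-first recursion by one iterative breadth-first pass building all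
-- combination strings with a comprehension; same return value everywhere (both A and B also
-- mutate allbases in place in Python; the ports model the mutated list inside the return value,
-- except in the empty-params case where both Pythons return None after appending curval).

-- ===== PORT A =====
-- A mutates allbases through recursive calls; the ports thread that state explicitly:
-- add2baseGo returns the mutated list, add2baseLoop is the 'for val in vals' loop.
mutual
def add2baseGo : List String → String → List (String × List Int) → List String
  | allbases, curval, [] => allbases ++ [curval]
  | allbases, curval, (param, vals) :: rest => add2baseLoop allbases curval param vals rest
def add2baseLoop : List String → String → String → List Int → List (String × List Int) → List String
  | allbases, _, _, [], _ => allbases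
  | allbases, curval, param, val :: vals, rest =>
      add2baseLoop (add2baseGo allbases (curval ++ "_" ++ param ++ PySem.Int.toStr val) rest)
        curval param vals rest
end

def add2base (allbases : List String) (curval : String) (params2modify : List (String × List Int)) : Option (List String) :=
  match params2modify with
  | [] => none  -- Python appends curval to allbases and returns None
  | _ :: _ => some (add2baseGo allbases curval params2modify)

-- ===== PORT B =====
-- the body of B's 'combos = [c + '_' + name + str(v) for c in combos for v in vals]' step
def pvStep (combos : List String) (p : String × List Int) : List String :=
  combos.flatMap (fun c => p.2.map (fun v => c ++ "_" ++ p.1 ++ PySem.Int.toStr v))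

def add2base_alt (allbases : List String) (curval : String) (params2modify : List (String × List Int)) : Option (List String) :=
  match params2modify with
  | [] => none  -- Python appends curval to allbases and returns None
  | _ :: _ => some (allbases ++ params2modify.foldl pvStep [curval])

-- ===== PRECONDITION & SPEC =====
def Spec_add2base (allbases : List String) (curval : String) (params2modify : List (String × List Int)) (out : Option (List String)) : Prop := out = add2base_alt allbases curval params2modify
instance (allbases : List String) (curval : String) (params2modify : List (String × List Int)) (out : Option (List String)) : Decidable (Spec_add2base allbases curval params2modify out) := by unfold Spec_add2base; infer_instance

-- ===== CLAIM (what is proved, stated in full; the proofs are below) =====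
def Claim_equal_add2base : Prop := ∀ (allbases : List String) (curval : String) (params2modify : List (String × List Int)), Dom_add2base allbases curval params2modify → Spec_add2base allbases curval params2modify (add2base allbases curval params2modify)

-- ===== LEMMAS AND PROOFS =====

theorem pvStep_nil (p : String × List Int) : pvStep [] p = [] := by
  simp [pvStep]

theorem pvStep_append (xs ys : List String) (p : String × List Int) :
    pvStep (xs ++ ys) p = pvStep xs p ++ pvStep ys p := by
  simp [pvStep]

theorem foldl_pvStep_nil (ps : List (String × List Int)) :
    ps.foldl pvStep [] = [] := by
  induction ps with
  | nil => rfl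
  | cons p ps ih => simp [List.foldl, pvStep_nil, ih]

theorem foldl_pvStep_append (ps : List (String × List Int)) (xs ys : List String) :
    ps.foldl pvStep (xs ++ ys) = ps.foldl pvStep xs ++ ps.foldl pvStep ys := by
  induction ps generalizing xs ys with
  | nil => rfl
  | cons p ps ih => simp [List.foldl, pvStep_append, ih]

theorem go_eq_expand (ps : List (String × List Int)) :
    ∀ (a : List String) (c : String), add2baseGo a c ps = a ++ ps.foldl pvStep [c] := by
  induction ps with
  | nil => intro a c; rw [add2baseGo]; rfl
  | cons p ps ih =>
    obtain ⟨param, vals⟩ := p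
    have loopEq : ∀ (vs : List Int) (a : List String) (c : String),
        add2baseLoop a c param vs ps =
          a ++ ps.foldl pvStep (vs.map (fun v => c ++ "_" ++ param ++ PySem.Int.toStr v)) := by
      intro vs
      induction vs with
      | nil => intro a c; simp [add2baseLoop, foldl_pvStep_nil]
      | cons v vs ihv =>
        intro a c
        rw [add2baseLoop, ihv, ih]
        rw [List.map_cons, show (c ++ "_" ++ param ++ PySem.Int.toStr v) ::
              vs.map (fun v => c ++ "_" ++ param ++ PySem.Int.toStr v) =
            [c ++ "_" ++ param ++ PySem.Int.toStr v] ++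
              vs.map (fun v => c ++ "_" ++ param ++ PySem.Int.toStr v) from rfl]
        rw [foldl_pvStep_append, List.append_assoc]
    intro a c
    rw [add2baseGo, loopEq]
    have : pvStep [c] (param, vals) =
        vals.map (fun v => c ++ "_" ++ param ++ PySem.Int.toStr v) := by
      simp [pvStep]
    simp [List.foldl, this]

-- ===== VERDICT (by name: the statement is the Claim_ definition above) =====
theorem add2base_spec : Claim_equal_add2base := by
  intro allbases curval params2modify _
  unfold Spec_add2base add2base add2base_alt
  cases params2modify with
  | nil => rfl
  | cons p ps => simp [go_eq_expand]
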